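-- pv_equiv track=rewrite | github.com/14E47/InterviewBit | Academy/Day3/multiple_left_rotations_of_the_array.py | solve
-- ===== SOURCE A (Python) =====
-- def solve(A, B):
--     n = len(A)
--     m = len(B)
--
--     if n == 1:
--         return [A for i in range(m)]
--
--     result = []
--     for i in B:
--         mod = i%n
--         result.append(A[mod:] + A[:mod])
--     return result
-- ===== SOURCE B (Python) =====
-- def solve(A, B):
--     n = len(A)
--     # build the table of all n rotations once, each obtained from the previous
--     # by moving its first element to the end; then answer each query by lookup
--     rots = []
--     cur = A
--     for _ in range(n):
--         rots.append(cur)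
--         cur = cur[1:] + cur[:1]
--     return [rots[i % n] for i in B]
-- ===== Notes on version B (the rewrite author's own statement) =====
-- stated objective: alternative
-- what changed: B precomputes the table of all n rotations incrementally (each rotation derived from the previous one by moving its first element to the end) and then answers every query by a table lookup, instead of A's from-scratch two-slice rotation per query.
import Mathlib
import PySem

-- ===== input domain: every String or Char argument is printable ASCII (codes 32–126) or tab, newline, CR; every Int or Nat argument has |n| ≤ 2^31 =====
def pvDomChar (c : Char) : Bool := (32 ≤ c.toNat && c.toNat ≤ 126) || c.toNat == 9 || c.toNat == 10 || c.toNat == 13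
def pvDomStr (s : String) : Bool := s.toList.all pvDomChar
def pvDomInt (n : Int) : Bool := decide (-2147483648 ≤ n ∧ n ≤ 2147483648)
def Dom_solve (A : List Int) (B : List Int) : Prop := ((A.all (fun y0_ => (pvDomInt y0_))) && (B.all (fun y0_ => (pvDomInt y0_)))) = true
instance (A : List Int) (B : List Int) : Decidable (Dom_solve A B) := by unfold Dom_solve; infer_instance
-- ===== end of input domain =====

-- B builds the table of all n rotations once (each rotation derived from the previous
-- one by moving its first element to the end) and answers each query by table lookup,
-- instead of A's from-scratch two-slice rotation per query; return values agree.

-- ===== PORT A =====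
def solve (A : List Int) (B : List Int) : List (List Int) :=
  let n : Int := A.length
  let m : Int := B.length
  if n == 1 then
    (PySem.List.pyRange 0 m 1).map (fun _ => A)
  else
    B.foldl (fun result i =>
      let mod := PySem.Int.mod i n
      result ++ [PySem.List.slice A (some mod) none ++ PySem.List.slice A none (some mod)]) []

-- ===== PORT B =====
-- cur[1:] + cur[:1]
def pvRotStep (L : List Int) : List Int :=
  PySem.List.slice L (some 1) none ++ PySem.List.slice L none (some 1)

def solve_alt (A : List Int) (B : List Int) : List (List Int) :=
  let n : Int := A.length
  -- for _ in range(n): rots.append(cur); cur = cur[1:] + cur[:1]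
  let rots := ((List.range A.length).foldl
      (fun (p : List (List Int) × List Int) _ => (p.1 ++ [p.2], pvRotStep p.2)) ([], A)).1
  -- rots[i % n]: the index is always in range here, so pyGet? is some; .getD [] totalizes
  B.map (fun i => (PySem.List.pyGet? rots (PySem.Int.mod i n)).getD [])

-- ===== PRECONDITION & SPEC =====
-- Pre_ excludes empty A with nonempty B: there both programs raise ZeroDivisionError (i % 0).
def Pre_solve (A : List Int) (B : List Int) : Prop := A ≠ [] ∨ B = []
instance (A : List Int) (B : List Int) : Decidable (Pre_solve A B) := by unfold Pre_solve; infer_instance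
def pvWitness_solve : List Int × List Int := ([1, 2, 3], [0, 1, 4, -1])

def Spec_solve (A : List Int) (B : List Int) (out : List (List Int)) : Prop := out = solve_alt A B
instance (A : List Int) (B : List Int) (out : List (List Int)) : Decidable (Spec_solve A B out) := by unfold Spec_solve; infer_instance

-- ===== CLAIM (what is proved, stated in full; the proofs are below) =====
def Claim_equal_solve : Prop := ∀ (A : List Int) (B : List Int), Dom_solve A B → Pre_solve A B → Spec_solve A B (solve A B)

-- ===== LEMMAS AND PROOFS =====

-- one incremental step advances the rotation by one position
theorem rotStep_rot (A : List Int) (k : Nat) (hk : k < A.length) :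
    pvRotStep (A.drop k ++ A.take k) = A.drop (k + 1) ++ A.take (k + 1) := by
  have hd : A.drop k = A[k] :: A.drop (k + 1) := List.drop_eq_getElem_cons hk
  have h1 : pvRotStep (A.drop k ++ A.take k)
      = (A.drop k ++ A.take k).drop 1 ++ (A.drop k ++ A.take k).take 1 := by
    unfold pvRotStep
    rw [PySem.List.slice_from _ (by norm_num), PySem.List.slice_to _ (by norm_num)]
    rfl
  rw [h1, hd, List.take_succ_eq_append_getElem hk, List.cons_append, List.drop_one,
      List.tail_cons, List.take_succ_cons, List.take_zero, List.append_assoc]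

-- iterating the step from A gives the k-th rotation
theorem rotStep_iterate (A : List Int) : ∀ k, k ≤ A.length →
    pvRotStep^[k] A = A.drop k ++ A.take k := by
  intro k
  induction k with
  | zero => simp
  | succ k ih =>
    intro hk
    rw [Function.iterate_succ_apply', ih (by omega), rotStep_rot A k (by omega)]

-- the table loop produces exactly the list of the first m iterates
theorem rots_fold (m : Nat) : ∀ (acc : List (List Int)) (cur : List Int),
    (List.range m).foldl
      (fun (p : List (List Int) × List Int) _ => (p.1 ++ [p.2], pvRotStep p.2)) (acc, cur)
    = (acc ++ (List.range m).map (fun j => pvRotStep^[j] cur), pvRotStep^[m] cur) := by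
  induction m with
  | zero => simp
  | succ m ih =>
    intro acc cur
    rw [List.range_succ, List.foldl_append, ih]
    simp [Function.iterate_succ_apply', List.append_assoc]

theorem rots_eq (A : List Int) :
    ((List.range A.length).foldl
      (fun (p : List (List Int) × List Int) _ => (p.1 ++ [p.2], pvRotStep p.2)) ([], A)).1
    = (List.range A.length).map (fun k => A.drop k ++ A.take k) := by
  rw [rots_fold]
  simp only [List.nil_append]
  apply List.map_congr_left
  intro k hk
  exact rotStep_iterate A k (le_of_lt (List.mem_range.mp hk))

-- each query's lookup is the rotation by i % n
theorem lookup_eq (A : List Int) (i : Int) (hA : A ≠ []) :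
    (PySem.List.pyGet? ((List.range A.length).map (fun k => A.drop k ++ A.take k))
        (PySem.Int.mod i A.length)).getD []
    = A.drop (PySem.Int.mod i A.length).toNat ++ A.take (PySem.Int.mod i A.length).toNat := by
  have hn : 0 < (A.length : Int) := by
    have := List.length_pos_iff.mpr hA; exact_mod_cast this
  set m := PySem.Int.mod i A.length with hm
  have h0 : 0 ≤ m := PySem.Int.mod_nonneg i hn
  have hlt : m.toNat < A.length := by
    have := PySem.Int.mod_lt i hn; omega
  rw [PySem.List.pyGet?_of_nonneg _ h0]
  rw [List.getElem?_eq_getElem (by simpa using hlt)]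
  simp

theorem solve_eq (A : List Int) (B : List Int) (h : Pre_solve A B) :
    solve A B = solve_alt A B := by
  rcases h with hA | hB
  · simp only [solve, solve_alt, rots_eq]
    by_cases h1 : A.length = 1
    · obtain ⟨a, ha⟩ : ∃ a, A = [a] := by
        cases A with
        | nil => simp at h1
        | cons x xs => cases xs with
          | nil => exact ⟨x, rfl⟩
          | cons y ys => simp at h1
      subst ha
      have hL : List.map (fun (_ : Int) => [a]) (PySem.List.pyRange 0 (B.length : Int) 1)
          = List.replicate B.length [a] := by
        simp [PySem.List.pyRange_one, Function.comp_def, List.map_const']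
      have hR : List.map (fun i =>
          (PySem.List.pyGet? (List.map (fun k => List.drop k [a] ++ List.take k [a])
            (List.range [a].length)) (PySem.Int.mod i ([a].length : Int))).getD []) B
          = List.replicate B.length [a] := by
        have : ∀ i ∈ B, (PySem.List.pyGet? (List.map (fun k => List.drop k [a] ++ List.take k [a])
            (List.range [a].length)) (PySem.Int.mod i ([a].length : Int))).getD [] = [a] := by
          intro i _
          simp [PySem.List.pyGet?, PySem.List.pyIdx?]
        rw [List.map_congr_left this, List.map_const']
      simp only [List.length_cons, List.length_nil]
      rw [if_pos (by simp)]
      exact hL.trans hR.symm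
    · have hne : ¬ ((A.length : Int) == 1) = true := by
        simp only [beq_iff_eq]
        intro hcontra
        exact h1 (by exact_mod_cast hcontra)
      rw [if_neg hne]
      rw [PySem.List.foldl_append_singleton_eq_map]
      simp only [List.nil_append]
      apply List.map_congr_left
      intro i _
      rw [lookup_eq A i hA]
      have hn : 0 < (A.length : Int) := by
        have := List.length_pos_iff.mpr hA; exact_mod_cast this
      have h0 : 0 ≤ PySem.Int.mod i A.length := PySem.Int.mod_nonneg i hn
      rw [PySem.List.slice_from A h0, PySem.List.slice_to A h0]
  · subst hB
    simp [solve, solve_alt]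

-- ===== VERDICT (by name: the statement is the Claim_ definition above) =====
theorem solve_spec : Claim_equal_solve := by
  intro A B _ hpre
  exact solve_eq A B hpre
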